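-- pv_equiv track=rewrite | github.com/takoyaki-3/takoyaki3-com | .github/scripts/extract_pr_details.py | _normalize_body
-- ===== SOURCE A (Python) =====
-- def _normalize_body(text: str) -> str:
--     """
--     本文内の余計な空行や末尾の空白を整形する。
--     行数・文字数は基本的に制限しない（ユーザーの指示優先）。
--     """
--     if not text:
--         return ""
--
--     lines = [line.rstrip() for line in text.splitlines()]
--
--     # 先頭・末尾の空行を削除
--     while lines and not lines[0].strip():
--         lines.pop(0)
--     while lines and not lines[-1].strip():
--         lines.pop()
--
--     # 連続する空行は 1 行に圧縮
--     compressed = []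
--     blank = False
--     for line in lines:
--         if line.strip():
--             compressed.append(line)
--             blank = False
--         else:
--             if not blank:
--                 compressed.append("")
--                 blank = True
--
--     return "\n".join(compressed).rstrip()
-- ===== SOURCE B (Python) =====
-- def _normalize_body(text: str) -> str:
--     # Group the rstripped lines into paragraphs of consecutive non-empty
--     # lines, then join the paragraphs with a single blank line.
--     paragraphs = []
--     current = []
--     for line in text.splitlines():
--         line = line.rstrip()
--         if line:
--             current.append(line)
--         elif current:
--             paragraphs.append(current)
--             current = []
--     if current:
--         paragraphs.append(current)
--     return "\n\n".join("\n".join(p) for p in paragraphs)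
-- ===== Notes on version B (the rewrite author's own statement) =====
-- stated objective: simpler
-- what changed: Replaced A's two trim-while-loops plus blank-flag compression pass and final rstrip by a single fold that groups the rstripped lines into paragraphs of consecutive non-empty lines, joined with ' '.
import Mathlib
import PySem

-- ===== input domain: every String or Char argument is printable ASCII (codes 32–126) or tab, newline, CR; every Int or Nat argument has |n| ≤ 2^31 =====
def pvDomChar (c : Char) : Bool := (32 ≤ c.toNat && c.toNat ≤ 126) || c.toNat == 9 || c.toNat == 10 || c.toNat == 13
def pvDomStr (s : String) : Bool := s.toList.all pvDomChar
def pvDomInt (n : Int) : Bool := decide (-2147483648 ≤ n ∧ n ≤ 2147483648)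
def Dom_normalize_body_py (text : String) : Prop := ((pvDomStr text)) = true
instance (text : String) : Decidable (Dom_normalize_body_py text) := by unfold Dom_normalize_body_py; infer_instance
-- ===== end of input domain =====

-- B groups the rstripped lines into paragraphs and joins them with a blank
-- line, replacing A's trim-while-loops + blank-flag compression pass (objective: simpler).

-- ===== PORT A =====
-- literal transliteration of A: rstrip each line, pop blank lines from the
-- front and from the back (the end-pop while loop is the same loop run on the
-- reversed list), then compress runs of blank lines with a Bool flag, join, rstrip.
def normalize_body_py (text : String) : String :=
  if text = "" then ""
  else
    let lines := (PySem.Str.splitlines text).map PySem.Str.rstrip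
    let lines := lines.dropWhile (fun l => PySem.Str.strip l == "")
    let lines := ((lines.reverse).dropWhile (fun l => PySem.Str.strip l == "")).reverse
    let r := lines.foldl
      (fun (acc : List String × Bool) line =>
        if PySem.Str.strip line ≠ "" then (acc.1 ++ [line], false)
        else if acc.2 then acc else (acc.1 ++ [""], true))
      ([], false)
    PySem.Str.rstrip (PySem.Str.join "\n" r.1)

-- ===== PORT B =====
-- literal transliteration of B (Source B): one fold collecting paragraphs of
-- consecutive non-empty rstripped lines, then "\n\n".join of "\n".joins.
def normalize_body_py_alt (text : String) : String :=
  let r := (PySem.Str.splitlines text).foldl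
    (fun (acc : List (List String) × List String) line0 =>
      let line := PySem.Str.rstrip line0
      if line ≠ "" then (acc.1, acc.2 ++ [line])
      else if acc.2 ≠ [] then (acc.1 ++ [acc.2], []) else acc)
    ([], [])
  let paragraphs := if r.2 ≠ [] then r.1 ++ [r.2] else r.1
  PySem.Str.join "\n\n" (paragraphs.map (fun p => PySem.Str.join "\n" p))

-- ===== PRECONDITION & SPEC =====
def Spec_normalize_body_py (text : String) (out : String) : Prop := out = normalize_body_py_alt text
instance (text : String) (out : String) : Decidable (Spec_normalize_body_py text out) := by unfold Spec_normalize_body_py; infer_instance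

-- ===== CLAIM (what is proved, stated in full; the proofs are below) =====
def Claim_equal_normalize_body_py : Prop := ∀ (text : String), Dom_normalize_body_py text → Spec_normalize_body_py text (normalize_body_py text)

-- ===== LEMMAS AND PROOFS =====

-- recursive characterisation of A's compression fold (blank test already (· = ""))
def pvCompressR : Bool → List String → List String
  | _, [] => []
  | b, l :: ls =>
    if l = "" then (if b then pvCompressR true ls else "" :: pvCompressR true ls)
    else l :: pvCompressR false ls

-- recursive characterisation of B's paragraph fold
def pvParasR : List String → List String → List (List String)
  | cur, [] => if cur = [] then [] else [cur]
  | cur, l :: ls =>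
    if l = "" then (if cur = [] then pvParasR [] ls else cur :: pvParasR [] ls)
    else pvParasR (cur ++ [l]) ls

theorem pv_rstrip_idem (s : String) :
    PySem.Str.rstrip (PySem.Str.rstrip s) = PySem.Str.rstrip s := by
  simp [PySem.Str.rstrip, PySem.Chars.rstrip, List.dropWhile_idempotent]

theorem pv_strip_empty_iff (s : String) (h : PySem.Str.rstrip s = s) :
    (PySem.Str.strip s = "") ↔ (s = "") := by
  constructor
  · intro hs
    by_contra hne
    have hcs : List.dropWhile PySem.Chars.isspace s.toList.reverse = s.toList.reverse := by
      have := congrArg String.toList h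
      simp only [PySem.Str.rstrip, PySem.Chars.rstrip, String.toList_ofList] at this
      have := congrArg List.reverse this
      simpa using this
    have hall : ∀ x ∈ PySem.Chars.lstrip s.toList, PySem.Chars.isspace x = true := by
      have := congrArg String.toList hs
      simp only [PySem.Str.strip, PySem.Chars.strip, PySem.Chars.rstrip, String.toList_ofList] at this
      have h2 : List.dropWhile PySem.Chars.isspace (PySem.Chars.lstrip s.toList).reverse = [] := by
        simpa using congrArg List.reverse this
      intro x hx
      exact List.dropWhile_eq_nil_iff.mp h2 x (List.mem_reverse.mpr hx)
    have hnil : s.toList ≠ [] := by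
      intro hx; apply hne; rw [← String.ofList_toList (s := s), hx]
    obtain ⟨c, t, hct⟩ : ∃ c t, s.toList.reverse = c :: t := by
      rcases hr : s.toList.reverse with _ | ⟨c, t⟩
      · exact absurd (by simpa using congrArg List.reverse hr) hnil
      · exact ⟨c, t, rfl⟩
    have hpc : ¬ PySem.Chars.isspace c = true := by
      have := List.dropWhile_eq_self_iff.mp hcs
      rw [hct] at this
      simpa using this (by simp)
    have hcmem : c ∈ s.toList := by
      have : c ∈ s.toList.reverse := by rw [hct]; exact List.mem_cons_self
      exact List.mem_reverse.mp this
    rcases List.mem_append.mp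
        (by rw [List.takeWhile_append_dropWhile]; exact hcmem :
          c ∈ List.takeWhile PySem.Chars.isspace s.toList ++ List.dropWhile PySem.Chars.isspace s.toList) with hm | hm
    · exact hpc (List.mem_takeWhile_imp hm)
    · exact hpc (hall c hm)
  · intro hs; subst hs; rfl

theorem pv_foldA (ls : List String) (acc : List String) (b : Bool)
    (h : ∀ l ∈ ls, (PySem.Str.strip l = "") ↔ (l = "")) :
    (ls.foldl
      (fun (acc : List String × Bool) line =>
        if PySem.Str.strip line ≠ "" then (acc.1 ++ [line], false)
        else if acc.2 then acc else (acc.1 ++ [""], true))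
      (acc, b)).1 = acc ++ pvCompressR b ls := by
  induction ls generalizing acc b with
  | nil => simp [pvCompressR]
  | cons l ls ih =>
    have hiff := h l List.mem_cons_self
    have h' : ∀ x ∈ ls, (PySem.Str.strip x = "") ↔ (x = "") :=
      fun x hx => h x (List.mem_cons_of_mem _ hx)
    rw [List.foldl_cons]
    by_cases hl : l = ""
    · have hstrip : ¬ PySem.Str.strip l ≠ "" := by simp [hiff.mpr hl]
      cases b with
      | true =>
        rw [if_neg hstrip, if_pos rfl, ih _ _ h']
        simp [pvCompressR, hl]
      | false =>
        rw [if_neg hstrip, if_neg (by simp), ih _ _ h']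
        simp [pvCompressR, hl]
    · have hstrip : PySem.Str.strip l ≠ "" := fun hx => hl (hiff.mp hx)
      rw [if_pos hstrip, ih _ _ h']
      simp [pvCompressR, hl]

def pvFinB (r : List (List String) × List String) : List (List String) :=
  if r.2 ≠ [] then r.1 ++ [r.2] else r.1

theorem pv_foldB (ls : List String) (paras : List (List String)) (cur : List String) :
    pvFinB (ls.foldl
      (fun (acc : List (List String) × List String) line =>
        if line ≠ "" then (acc.1, acc.2 ++ [line])
        else if acc.2 ≠ [] then (acc.1 ++ [acc.2], []) else acc)
      (paras, cur)) = paras ++ pvParasR cur ls := by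
  induction ls generalizing paras cur with
  | nil =>
    by_cases hc : cur = [] <;> simp [pvFinB, pvParasR, hc]
  | cons l ls ih =>
    rw [List.foldl_cons]
    by_cases hl : l = ""
    · by_cases hc : cur = []
      · simp only [hl, hc, ne_eq, not_true_eq_false, reduceIte]
        rw [ih paras []]
        simp [pvParasR]
      · simp only [hl, ne_eq, not_true_eq_false, reduceIte, hc, not_false_eq_true]
        rw [ih (paras ++ [cur]) []]
        simp [pvParasR, hc]
    · simp only [ne_eq, hl, not_false_eq_true, reduceIte]
      rw [ih paras (cur ++ [l])]
      simp [pvParasR, hl]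

theorem pv_parasR_ne_nil (cur : List String) (h : cur ≠ []) (ls : List String) :
    pvParasR cur ls ≠ [] := by
  induction ls generalizing cur with
  | nil => simp [pvParasR, h]
  | cons l ls ih =>
    by_cases hl : l = ""
    · simp [pvParasR, hl, h]
    · simpa [pvParasR, hl] using ih (cur ++ [l]) (by simp)

theorem pv_parasR_mem_ne_nil (cur ls : List String) (hcur : ∀ l ∈ cur, l ≠ "") :
    ∀ p ∈ pvParasR cur ls, p ≠ [] := by
  induction ls generalizing cur with
  | nil =>
    intro p hp
    by_cases hc : cur = [] <;> simp [pvParasR, hc] at hp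
    subst hp; exact hc
  | cons l ls ih =>
    intro p hp
    by_cases hl : l = ""
    · by_cases hc : cur = []
      · exact ih [] (by simp) p (by simpa [pvParasR, hl, hc] using hp)
      · rcases (by simpa [pvParasR, hl, hc] using hp : p = cur ∨ p ∈ pvParasR [] ls) with h1 | h1
        · subst h1; exact hc
        · exact ih [] (by simp) p h1
    · refine ih (cur ++ [l]) ?_ p (by simpa [pvParasR, hl] using hp)
      intro x hx
      rcases List.mem_append.mp hx with h1 | h1
      · exact hcur x h1
      · simp only [List.mem_singleton] at h1; subst h1; exact hl

theorem pv_parasR_dropWhile (ls : List String) :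
    pvParasR [] (ls.dropWhile (fun l => l == "")) = pvParasR [] ls := by
  induction ls with
  | nil => rfl
  | cons l ls ih =>
    by_cases hl : l = ""
    · simp [hl, ih, pvParasR]
    · simp [hl, pvParasR]

theorem pv_parasR_blanks (bs : List String) (hb : ∀ b ∈ bs, b = "") (cur : List String) :
    pvParasR cur bs = if cur = [] then [] else [cur] := by
  induction bs generalizing cur with
  | nil => rfl
  | cons b bs ih =>
    have hb0 : b = "" := hb b List.mem_cons_self
    have hb' : ∀ x ∈ bs, x = "" := fun x hx => hb x (List.mem_cons_of_mem _ hx)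
    by_cases hc : cur = [] <;>
      simp [pvParasR, hb0, hc, ih hb']

theorem pv_parasR_append_blanks (ls bs : List String) (hb : ∀ b ∈ bs, b = "")
    (cur : List String) : pvParasR cur (ls ++ bs) = pvParasR cur ls := by
  induction ls generalizing cur with
  | nil =>
    simp only [List.nil_append]
    rw [pv_parasR_blanks bs hb cur]; rfl
  | cons l ls ih =>
    by_cases hl : l = "" <;> simp [pvParasR, hl, ih]

theorem pv_compress_true (ls : List String) :
    pvCompressR true ls = pvCompressR false (ls.dropWhile (fun l => l == "")) := by
  induction ls with
  | nil => rfl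
  | cons l ls ih =>
    by_cases hl : l = ""
    · simp [pvCompressR, hl, ih]
    · simp [pvCompressR, hl]

theorem pv_intercalate_cons_cons {α : Type} (s : List α) (a b : List α) (l : List (List α)) :
    List.intercalate s (a :: b :: l) = a ++ s ++ List.intercalate s (b :: l) := by
  simp [List.intercalate, List.intersperse_cons₂]
theorem pv_intercalate_singleton {α : Type} (s : List α) (a : List α) :
    List.intercalate s [a] = a := by
  simp [List.intercalate]
theorem pv_intercalate_cons_ne {α : Type} (s : List α) (a : List α) (l : List (List α))
    (h : l ≠ []) : List.intercalate s (a :: l) = a ++ s ++ List.intercalate s l := by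
  cases l with
  | nil => exact absurd rfl h
  | cons b t => exact pv_intercalate_cons_cons s a b t
theorem pv_intercalate_append {α : Type} (s : List α) (xs ys : List (List α))
    (hx : xs ≠ []) (hy : ys ≠ []) :
    List.intercalate s (xs ++ ys) = List.intercalate s xs ++ s ++ List.intercalate s ys := by
  induction xs with
  | nil => exact absurd rfl hx
  | cons a xs ih =>
    rcases xs with _ | ⟨b, t⟩
    · rw [List.singleton_append, pv_intercalate_cons_ne s a ys hy, pv_intercalate_singleton]
    · rw [List.cons_append, pv_intercalate_cons_ne s a ((b :: t) ++ ys) (by simp),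
        ih (by simp), pv_intercalate_cons_ne s a (b :: t) (by simp)]
      simp [List.append_assoc]

-- the central list identity: on a back-trimmed list, compression = intercalated paragraphs
theorem pv_G (n : ℕ) : ∀ (ls cur : List String), ls.length ≤ n → cur ≠ [] →
    (ls = [] ∨ ls.getLast? ≠ some "") →
    cur ++ pvCompressR false ls = List.intercalate [""] (pvParasR cur ls) := by
  induction n with
  | zero =>
    intro ls cur hlen hcur _
    have : ls = [] := List.length_eq_zero_iff.mp (Nat.le_zero.mp hlen)
    subst this
    simp [pvCompressR, pvParasR, hcur, pv_intercalate_singleton]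
  | succ n ih =>
    intro ls cur hlen hcur hlast
    match ls with
    | [] => simp [pvCompressR, pvParasR, hcur, pv_intercalate_singleton]
    | l :: ls =>
      have hlast' : (l :: ls).getLast? ≠ some "" := hlast.resolve_left (by simp)
      have hlen' : ls.length ≤ n := by simpa using hlen
      by_cases hl : l = ""
      · subst hl
        have hls_ne : ls ≠ [] := by
          intro hx; subst hx; simp at hlast'
        have hlast'' : ls.getLast? ≠ some "" := by
          rcases ls with _ | ⟨x, t⟩
          · exact absurd rfl hls_ne
          · simpa [List.getLast?_cons_cons] using hlast'
        set ls' := ls.dropWhile (fun l => l == "") with hls'def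
        have hne' : ls' ≠ [] := by
          intro hx
          have hallb := List.dropWhile_eq_nil_iff.mp hx
          have hmem := List.getLast_mem hls_ne
          have : ls.getLast hls_ne = "" := by
            have := hallb _ hmem; simpa using this
          exact hlast'' (by rw [List.getLast?_eq_some_getLast hls_ne, this])
        have hlast3 : ls'.getLast? = ls.getLast? := by
          conv_rhs => rw [← List.takeWhile_append_dropWhile (p := fun l => l == "") (l := ls)]
          rw [List.getLast?_append]
          rcases hx : ls'.getLast? with _ | y
          · exact absurd (List.getLast?_eq_none_iff.mp (hls'def ▸ hx)) hne'
          · simp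
        obtain ⟨l', ls'', hcons⟩ : ∃ l' ls'', ls' = l' :: ls'' := by
          rcases hx : ls' with _ | ⟨a, b⟩
          · exact absurd hx hne'
          · exact ⟨a, b, rfl⟩
        have hl' : l' ≠ "" := by
          have hself : List.dropWhile (fun l => l == "") ls' = ls' :=
            hls'def ▸ List.dropWhile_idempotent _ _
          have := List.dropWhile_eq_self_iff.mp hself
          intro hx
          exact (by simpa [hcons, hx] using this (by simp [hcons]) : False)
        have hlast4 : ls'' = [] ∨ ls''.getLast? ≠ some "" := by
          rcases ls'' with _ | ⟨x, t⟩
          · exact Or.inl rfl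
          · refine Or.inr ?_
            have : ls'.getLast? = (x :: t).getLast? := by rw [hcons, List.getLast?_cons_cons]
            rw [← this, hlast3]; exact hlast''
        have hlen'' : ls''.length ≤ n := by
          have h1 : ls'.length ≤ ls.length := hls'def ▸ List.length_dropWhile_le _ _
          have h2 : ls''.length < ls'.length := by simp [hcons]
          omega
        have hIH := ih ls'' [l'] hlen'' (by simp) hlast4
        have hP : pvParasR [] ls = pvParasR [l'] ls'' := by
          rw [← pv_parasR_dropWhile, ← hls'def, hcons]
          simp [pvParasR, hl']
        have hPne : pvParasR [l'] ls'' ≠ [] := pv_parasR_ne_nil [l'] (by simp) ls''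
        obtain ⟨q, Q, hQ⟩ : ∃ q Q, pvParasR [l'] ls'' = q :: Q := by
          rcases hx : pvParasR [l'] ls'' with _ | ⟨a, b⟩
          · exact absurd hx hPne
          · exact ⟨a, b, rfl⟩
        calc cur ++ pvCompressR false ("" :: ls)
            = cur ++ "" :: pvCompressR false ls' := by
              simp [pvCompressR, pv_compress_true, hls'def]
          _ = cur ++ [""] ++ ([l'] ++ pvCompressR false ls'') := by
              simp [hcons, pvCompressR, hl']
          _ = cur ++ [""] ++ List.intercalate [""] (pvParasR [l'] ls'') := by rw [hIH]
          _ = List.intercalate [""] (cur :: pvParasR [l'] ls'') := by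
              rw [hQ, pv_intercalate_cons_cons]
          _ = List.intercalate [""] (pvParasR cur ("" :: ls)) := by
              simp [pvParasR, hcur, hP]
      · have hlast2 : ls = [] ∨ ls.getLast? ≠ some "" := by
          rcases ls with _ | ⟨x, t⟩
          · exact Or.inl rfl
          · exact Or.inr (by simpa [List.getLast?_cons_cons] using hlast')
        calc cur ++ pvCompressR false (l :: ls)
            = (cur ++ [l]) ++ pvCompressR false ls := by simp [pvCompressR, hl]
          _ = List.intercalate [""] (pvParasR (cur ++ [l]) ls) :=
              ih ls (cur ++ [l]) hlen' (by simp) hlast2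
          _ = List.intercalate [""] (pvParasR cur (l :: ls)) := by simp [pvParasR, hl]

-- last element survives compression
theorem pv_compress_last (ls : List String) (b : Bool) (h : ls ≠ [])
    (hl : ls.getLast? ≠ some "") :
    pvCompressR b ls ≠ [] ∧ (pvCompressR b ls).getLast? = ls.getLast? := by
  have ceq : ∀ (b : Bool) (l : String) (ls : List String), pvCompressR b (l :: ls) =
      if l = "" then (if b then pvCompressR true ls else "" :: pvCompressR true ls)
      else l :: pvCompressR false ls := fun _ _ _ => rfl
  induction ls generalizing b with
  | nil => exact absurd rfl h
  | cons l ls ih =>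
    rcases ls with _ | ⟨x, t⟩
    · have hlne : l ≠ "" := fun hx => hl (by simp [hx])
      rw [ceq]; simp [hlne, pvCompressR]
    · have hlast' : (x :: t).getLast? ≠ some "" := by
        simpa [List.getLast?_cons_cons] using hl
      have ihT := ih (b := true) (by simp) hlast'
      have ihF := ih (b := false) (by simp) hlast'
      by_cases hle : l = ""
      · cases b with
        | true =>
          rw [ceq, if_pos hle, if_pos rfl]
          exact ⟨ihT.1, by rw [ihT.2, List.getLast?_cons_cons]⟩
        | false =>
          rw [ceq, if_pos hle, if_neg (by simp)]
          refine ⟨by simp, ?_⟩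
          obtain ⟨a, b', hc⟩ := List.exists_cons_of_ne_nil ihT.1
          rw [hc, List.getLast?_cons_cons, ← hc, ihT.2, List.getLast?_cons_cons]
      · rw [ceq, if_neg hle]
        refine ⟨by simp, ?_⟩
        obtain ⟨a, b', hc⟩ := List.exists_cons_of_ne_nil ihF.1
        rw [hc, List.getLast?_cons_cons, ← hc, ihF.2, List.getLast?_cons_cons]

theorem pv_join2_intercalate (ps : List (List String)) (h : ∀ p ∈ ps, p ≠ []) :
    PySem.Chars.join ['\n', '\n'] (ps.map (fun p => PySem.Chars.join ['\n'] (p.map String.toList)))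
      = PySem.Chars.join ['\n'] ((List.intercalate [""] ps).map String.toList) := by
  simp only [PySem.Chars.join]
  induction ps with
  | nil => rfl
  | cons p ps ih =>
    rcases hps : ps with _ | ⟨q, qs⟩
    · simp [pv_intercalate_singleton]
    · rw [← hps]
      have hps_ne : ps ≠ [] := by rw [hps]; simp
      have hp : p ≠ [] := h p List.mem_cons_self
      have h' : ∀ x ∈ ps, x ≠ [] := fun x hx => h x (List.mem_cons_of_mem _ hx)
      have hInt_ne : List.intercalate [""] ps ≠ [] := by
        rw [hps]
        rcases qs with _ | ⟨r, rs⟩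
        · simpa [pv_intercalate_singleton] using (h' q (by rw [hps]; exact List.mem_cons_self))
        · rw [pv_intercalate_cons_cons]
          simp [h' q (by rw [hps]; exact List.mem_cons_self)]
      rw [List.map_cons, pv_intercalate_cons_ne _ _ _ (by simp [hps]), ih h',
        pv_intercalate_cons_ne _ _ _ hps_ne, List.map_append, List.map_append,
        pv_intercalate_append _ _ _ (by simp) (by simp [hInt_ne]),
        pv_intercalate_append _ _ _ (by simp [hp]) (by simp)]
      have htl : (("" : String).toList) = [] := rfl
      simp [htl, pv_intercalate_singleton, List.append_assoc]

theorem pv_rstrip_join (C : List String)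
    (h : C = [] ∨ ∃ l, C.getLast? = some l ∧ l ≠ "" ∧ PySem.Str.rstrip l = l) :
    PySem.Chars.rstrip (PySem.Chars.join ['\n'] (C.map String.toList))
      = PySem.Chars.join ['\n'] (C.map String.toList) := by
  rcases h with h | ⟨l, hlast, hlne, hfix⟩
  · subst h; rfl
  · obtain ⟨C', hC⟩ : ∃ C', C = C' ++ [l] := by
      rcases List.getLast?_eq_some_iff.mp hlast with ⟨C', hC'⟩
      exact ⟨C', hC'⟩
    have hlnil : l.toList ≠ [] := by
      intro hx; apply hlne; rw [← String.ofList_toList (s := l), hx]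
    obtain ⟨c, t, hct⟩ : ∃ c t, l.toList.reverse = c :: t := by
      rcases hr : l.toList.reverse with _ | ⟨c, t⟩
      · exact absurd (by simpa using congrArg List.reverse hr) hlnil
      · exact ⟨c, t, rfl⟩
    have hpc : ¬ PySem.Chars.isspace c = true := by
      have hfx : List.dropWhile PySem.Chars.isspace l.toList.reverse = l.toList.reverse := by
        have := congrArg String.toList hfix
        simp only [PySem.Str.rstrip, PySem.Chars.rstrip, String.toList_ofList] at this
        have := congrArg List.reverse this
        simpa using this
      have := List.dropWhile_eq_self_iff.mp hfx
      rw [hct] at this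
      simpa using this (by simp)
    have hsplit : ∃ A, PySem.Chars.join ['\n'] (C.map String.toList) = A ++ l.toList := by
      subst hC
      simp only [PySem.Chars.join]
      rcases C' with _ | ⟨a, as⟩
      · exact ⟨[], by simp [pv_intercalate_singleton]⟩
      · refine ⟨List.intercalate ['\n'] ((a :: as).map String.toList) ++ ['\n'], ?_⟩
        rw [List.map_append, pv_intercalate_append ['\n'] _ _ (by simp) (by simp)]
        simp [pv_intercalate_singleton, List.append_assoc]
    obtain ⟨A, hA⟩ := hsplit
    rw [hA]
    simp only [PySem.Chars.rstrip]
    rw [List.reverse_append, hct, List.cons_append, List.dropWhile_cons, if_neg hpc]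
    rw [← List.cons_append, ← hct]
    simp

theorem pv_dropWhile_congr {α : Type} (p q : α → Bool) (ls : List α)
    (h : ∀ x ∈ ls, p x = q x) : ls.dropWhile p = ls.dropWhile q := by
  induction ls with
  | nil => rfl
  | cons a ls ih =>
    rw [List.dropWhile_cons, List.dropWhile_cons, h a List.mem_cons_self,
      ih (fun x hx => h x (List.mem_cons_of_mem _ hx))]

theorem pv_dropWhile_head_not {α : Type} (p : α → Bool) (l : List α) (x : α) (xs : List α)
    (h : l.dropWhile p = x :: xs) : p x = false := by
  induction l with
  | nil => cases h
  | cons a t ih =>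
    rw [List.dropWhile_cons] at h
    by_cases hp : p a = true
    · rw [if_pos hp] at h; exact ih h
    · rw [if_neg hp] at h
      obtain ⟨h1, h2⟩ := List.cons.inj h
      subst h1
      simpa using hp

-- ===== VERDICT (by name: the statement is the Claim_ definition above) =====
theorem normalize_body_py_spec : Claim_equal_normalize_body_py := by
  intro text _
  unfold Spec_normalize_body_py
  by_cases ht : text = ""
  · subst ht; decide
  · have hAshow : normalize_body_py text = PySem.Str.rstrip (PySem.Str.join "\n"
        ((List.foldl
          (fun (acc : List String × Bool) line =>
            if PySem.Str.strip line ≠ "" then (acc.1 ++ [line], false)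
            else if acc.2 then acc else (acc.1 ++ [""], true))
          ([], false)
          (((((PySem.Str.splitlines text).map PySem.Str.rstrip).dropWhile
              (fun l => PySem.Str.strip l == "")).reverse.dropWhile
              (fun l => PySem.Str.strip l == "")).reverse)).1)) := by
      rw [normalize_body_py, if_neg ht]
    rw [hAshow]
    set L : List String := (PySem.Str.splitlines text).map PySem.Str.rstrip with hL
    have hfix : ∀ l ∈ L, PySem.Str.rstrip l = l := by
      intro l hl
      obtain ⟨s, _, rfl⟩ := List.mem_map.mp hl
      exact pv_rstrip_idem s
    have hiff : ∀ l ∈ L, (PySem.Str.strip l = "") ↔ (l = "") :=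
      fun l hl => pv_strip_empty_iff l (hfix l hl)
    have hbeq : ∀ l ∈ L, ((PySem.Str.strip l == "") : Bool) = (l == "") := by
      intro l hl
      by_cases hx : l = ""
      · have h1 : PySem.Str.strip l = "" := (hiff l hl).mpr hx
        rw [h1, hx]
      · have h1 : PySem.Str.strip l ≠ "" := fun hy => hx ((hiff l hl).mp hy)
        simp [hx, h1]
    -- convert the strip-based blank tests to plain emptiness tests
    have hd1 : L.dropWhile (fun l => PySem.Str.strip l == "") = L.dropWhile (fun l => l == "") :=
      pv_dropWhile_congr _ _ L hbeq
    set ls1 : List String := L.dropWhile (fun l => l == "") with hls1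
    have hsub1 : ∀ x ∈ ls1, x ∈ L := fun x hx => (List.dropWhile_sublist _).subset hx
    have hd2 : ls1.reverse.dropWhile (fun l => PySem.Str.strip l == "")
        = ls1.reverse.dropWhile (fun l => l == "") :=
      pv_dropWhile_congr _ _ _ (fun x hx => hbeq x (hsub1 x (List.mem_reverse.mp hx)))
    rw [hd1, hd2]
    set ls2 : List String := (ls1.reverse.dropWhile (fun l => l == "")).reverse with hls2
    have hsub2 : ∀ x ∈ ls2, x ∈ L := by
      intro x hx
      exact hsub1 x (List.mem_reverse.mp ((List.dropWhile_sublist _).subset (List.mem_reverse.mp hx)))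
    -- A's fold
    rw [pv_foldA ls2 [] false (fun l hl => hiff l (hsub2 l hl)), List.nil_append]
    -- B's side
    have hBfold : pvFinB ((PySem.Str.splitlines text).foldl
        (fun (acc : List (List String) × List String) line0 =>
          let line := PySem.Str.rstrip line0
          if line ≠ "" then (acc.1, acc.2 ++ [line])
          else if acc.2 ≠ [] then (acc.1 ++ [acc.2], []) else acc)
        ([], [])) = pvParasR [] L := by
      have h1 : (PySem.Str.splitlines text).foldl
          (fun (acc : List (List String) × List String) line0 =>
            let line := PySem.Str.rstrip line0
            if line ≠ "" then (acc.1, acc.2 ++ [line])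
            else if acc.2 ≠ [] then (acc.1 ++ [acc.2], []) else acc)
          ([], []) = L.foldl
          (fun (acc : List (List String) × List String) line =>
            if line ≠ "" then (acc.1, acc.2 ++ [line])
            else if acc.2 ≠ [] then (acc.1 ++ [acc.2], []) else acc)
          ([], []) := by
        rw [hL, List.foldl_map]
      rw [h1]
      simpa using pv_foldB L [] []
    have hBeq : normalize_body_py_alt text
        = PySem.Str.join "\n\n" ((pvParasR [] L).map (fun p => PySem.Str.join "\n" p)) := by
      rw [← hBfold]; rfl
    rw [hBeq]
    -- relate pvParasR on L and on the trimmed list ls2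
    set bs : List String := (ls1.reverse.takeWhile (fun l => l == "")).reverse with hbs
    have hdec : ls2 ++ bs = ls1 := by
      rw [hls2, hbs, ← List.reverse_append, List.takeWhile_append_dropWhile,
        List.reverse_reverse]
    have hbsblank : ∀ b ∈ bs, b = "" := by
      intro b hb
      have := List.mem_takeWhile_imp (List.mem_reverse.mp hb)
      simpa using this
    have hP : pvParasR [] L = pvParasR [] ls2 := by
      rw [← pv_parasR_dropWhile L, ← hls1, ← hdec, pv_parasR_append_blanks ls2 bs hbsblank]
    rw [hP]
    -- case on the trimmed list
    rcases hc : ls2 with _ | ⟨l, rest⟩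
    · rfl
    · have hls2ne : ls2 ≠ [] := by rw [hc]; simp
      have hls1ne : ls1 ≠ [] := by
        intro hx; rw [hx] at hdec
        exact hls2ne (List.append_eq_nil_iff.mp hdec).1
      have h10 : ls1 = l :: (rest ++ bs) := by rw [← hdec, hc, List.cons_append]
      have hlne : l ≠ "" := by
        have hhd := pv_dropWhile_head_not (fun l => l == "") L l (rest ++ bs)
          (by rw [← hls1]; exact h10)
        simpa using hhd
      have hrevls2 : ls2.reverse = ls1.reverse.dropWhile (fun l => l == "") := by
        simp [hls2]
      obtain ⟨y0, ys, hrev⟩ : ∃ y0 ys, ls2.reverse = y0 :: ys := by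
        rcases hr : ls2.reverse with _ | ⟨a, b⟩
        · have := congrArg List.reverse hr
          rw [List.reverse_reverse] at this
          exact absurd this hls2ne
        · exact ⟨a, b, rfl⟩
      have hy0 : ((y0 == "") : Bool) = false :=
        pv_dropWhile_head_not (fun l => l == "") ls1.reverse y0 ys (by rw [← hrevls2, hrev])
      have hgl : ls2.getLast? = some y0 := by
        rw [← List.head?_reverse, hrev]; rfl
      have hlast2 : ls2.getLast? ≠ some "" := by
        rw [hgl]
        intro hx
        have hy : y0 = "" := by injection hx
        rw [hy] at hy0; simp at hy0
      have hrest_last : rest = [] ∨ rest.getLast? ≠ some "" := by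
        rcases rest with _ | ⟨x, t⟩
        · exact Or.inl rfl
        · refine Or.inr ?_
          rw [hc, List.getLast?_cons_cons] at hlast2
          exact hlast2
      have hG := pv_G rest.length rest [l] le_rfl (by simp) hrest_last
      have hComp : pvCompressR false ls2 = List.intercalate [""] (pvParasR [] ls2) := by
        rw [hc]
        have e1 : pvCompressR false (l :: rest) = l :: pvCompressR false rest := by
          simp [pvCompressR, hlne]
        have e2 : pvParasR [] (l :: rest) = pvParasR [l] rest := by
          simp [pvParasR, hlne]
        rw [e1, e2, ← hG]
        rfl
      have hpne : ∀ p ∈ pvParasR [] ls2, p ≠ [] := pv_parasR_mem_ne_nil [] ls2 (by simp)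
      -- last line of the compressed list is non-blank and rstrip-fixed
      have hCL := pv_compress_last ls2 false hls2ne hlast2
      obtain ⟨y, hy⟩ : ∃ y, ls2.getLast? = some y := by
        rcases hx : ls2.getLast? with _ | y
        · exact absurd (List.getLast?_eq_none_iff.mp hx) hls2ne
        · exact ⟨y, rfl⟩
      have hyne : y ≠ "" := by
        intro hx; rw [hx] at hy; exact hlast2 hy
      have hymem : y ∈ ls2 := List.mem_of_getLast? hy
      have hyfix : PySem.Str.rstrip y = y := hfix y (hsub2 y hymem)
      -- move to char lists
      rw [← hc]
      refine String.toList_inj.mp ?_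
      have hnl : ("\n" : String).toList = ['\n'] := rfl
      have hnl2 : ("\n\n" : String).toList = ['\n', '\n'] := rfl
      simp only [PySem.Str.rstrip, PySem.Str.join, String.toList_ofList, hnl, hnl2,
        List.map_map]
      have hrj := pv_rstrip_join (pvCompressR false ls2)
        (Or.inr ⟨y, by rw [hCL.2]; exact hy, hyne, hyfix⟩)
      rw [hrj, hComp]
      have hfun : (String.toList ∘ fun p => String.ofList (PySem.Chars.join ['\n'] (List.map String.toList p)))
          = (fun (p : List String) => PySem.Chars.join ['\n'] (p.map String.toList)) := by
        funext p
        simp [Function.comp, String.toList_ofList]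
      rw [hfun]
      exact (pv_join2_intercalate (pvParasR [] ls2) hpne).symm
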